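-- pv_equiv track=rewrite | github.com/dobi02/lol-gnn-winrate-service | dags/evaluate_and_trigger_retrain_dag.py | _quantile_bins
-- ===== SOURCE A (Python) =====
-- from typing import Any, Dict, List, Optional, Tuple
--
-- def _quantile_bins(values: List[float], n_bins: int) -> List[Tuple[int, int]]:
--     """Return list of (start_idx, end_idx) ranges over sorted values."""
--     n = len(values)
--     if n == 0:
--         return []
--     n_bins = max(1, min(n_bins, n))
--     bins = []
--     for b in range(n_bins):
--         start = (b * n) // n_bins
--         end = ((b + 1) * n) // n_bins
--         if end <= start:
--             continue
--         bins.append((start, end))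
--     return bins
-- ===== SOURCE B (Python) =====
-- def _quantile_bins(values, n_bins):
--     # Reverse direction: instead of computing (start, end) per bin, scan the
--     # element indices once, assign index j to its bin ((j+1)*k - 1) // n (the
--     # largest b with b*n//k <= j), and emit a range each time the bin id
--     # changes.  Since k <= n every bin is non-empty, so runs cover all bins.
--     n = len(values)
--     if n == 0:
--         return []
--     k = max(1, min(n_bins, n))
--     bins = []
--     start = 0
--     cur = 0  # bin of index 0: (k - 1) // n == 0 because 1 <= k <= n
--     for j in range(1, n):
--         b = ((j + 1) * k - 1) // n
--         if b != cur:
--             bins.append((start, j))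
--             start, cur = j, b
--     bins.append((start, n))
--     return bins
-- ===== Notes on version B (the rewrite author's own statement) =====
-- stated objective: alternative
-- what changed: A loops over bins computing each bin's (start,end) by floor division; B scans element indices once, assigns index j to bin ((j+1)*k-1)//n (the inverse mapping) and emits a range whenever the bin id changes, so ranges are discovered as runs of equal bin ids.
import Mathlib
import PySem

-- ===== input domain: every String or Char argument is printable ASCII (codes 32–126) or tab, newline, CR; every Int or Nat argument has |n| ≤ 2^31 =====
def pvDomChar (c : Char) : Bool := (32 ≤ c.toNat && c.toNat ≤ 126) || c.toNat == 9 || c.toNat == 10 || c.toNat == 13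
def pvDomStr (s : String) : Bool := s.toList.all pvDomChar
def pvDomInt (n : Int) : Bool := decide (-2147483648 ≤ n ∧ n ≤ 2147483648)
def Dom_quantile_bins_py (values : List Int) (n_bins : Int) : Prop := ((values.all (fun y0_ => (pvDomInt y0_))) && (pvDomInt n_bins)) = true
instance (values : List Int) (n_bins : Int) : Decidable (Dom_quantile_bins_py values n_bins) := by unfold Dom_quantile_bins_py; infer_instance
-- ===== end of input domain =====

-- B replaces A's per-bin boundary computation by a single scan over element
-- indices, assigning index j to bin ((j+1)*k-1)//n and emitting a range at
-- each bin-id change; a different (inverse-mapping) algorithm, same result.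


-- ===== PORT A =====
def quantile_bins_py (values : List Int) (n_bins : Int) : List (Int × Int) :=
  let n : Int := values.length
  if n = 0 then []
  else
    let nb := max 1 (min n_bins n)
    (PySem.List.pyRange 0 nb 1).foldl
      (fun bins b =>
        let start := PySem.Int.floordiv (b * n) nb
        let e := PySem.Int.floordiv ((b + 1) * n) nb
        if e ≤ start then bins else bins ++ [(start, e)]) []

-- ===== PORT B =====
def quantile_bins_py_alt (values : List Int) (n_bins : Int) : List (Int × Int) :=
  let n : Int := values.length
  if n = 0 then []
  else
    let k := max 1 (min n_bins n)
    let st := (PySem.List.pyRange 1 n 1).foldl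
      (fun (st : Int × Int × List (Int × Int)) j =>
        let b := PySem.Int.floordiv ((j + 1) * k - 1) n
        if b ≠ st.2.1 then (j, b, st.2.2 ++ [(st.1, j)]) else st)
      (0, 0, [])
    st.2.2 ++ [(st.1, n)]

-- ===== PRECONDITION & SPEC =====
def Spec_quantile_bins_py (values : List Int) (n_bins : Int) (out : List (Int × Int)) : Prop := out = quantile_bins_py_alt values n_bins
instance (values : List Int) (n_bins : Int) (out : List (Int × Int)) : Decidable (Spec_quantile_bins_py values n_bins out) := by unfold Spec_quantile_bins_py; infer_instance

-- ===== CLAIM (what is proved, stated in full; the proofs are below) =====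
def Claim_equal_quantile_bins_py : Prop := ∀ (values : List Int) (n_bins : Int), Dom_quantile_bins_py values n_bins → Spec_quantile_bins_py values n_bins (quantile_bins_py values n_bins)

-- ===== LEMMAS AND PROOFS =====

-- cut point b of the partition: b*n // k
def qC (n k b : Int) : Int := PySem.Int.floordiv (b * n) k
-- bin id of element index j: ((j+1)*k - 1) // n, the largest b with qC n k b ≤ j
def qB (n k j : Int) : Int := PySem.Int.floordiv ((j + 1) * k - 1) n

theorem qC_mono (n k b b' : Int) (hk : 0 < k) (hn : 0 ≤ n) (h : b ≤ b') :
    qC n k b ≤ qC n k b' := by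
  unfold qC
  rw [PySem.Int.le_floordiv_iff_mul_le hk]
  have h1 := (PySem.Int.floordiv_eq_iff_of_pos (a := b * n) (q := PySem.Int.floordiv (b * n) k) hk).mp rfl
  nlinarith [h1.1]

theorem qC_succ (n k b : Int) (hk : 0 < k) (hkn : k ≤ n) :
    qC n k b < qC n k (b + 1) := by
  unfold qC
  have h1 := (PySem.Int.floordiv_eq_iff_of_pos (a := b * n) (q := PySem.Int.floordiv (b * n) k) hk).mp rfl
  have : PySem.Int.floordiv (b * n) k + 1 ≤ PySem.Int.floordiv ((b + 1) * n) k := by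
    rw [PySem.Int.le_floordiv_iff_mul_le hk]
    nlinarith [h1.1]
  omega

theorem qC_zero (n k : Int) (hk : 0 < k) : qC n k 0 = 0 := by
  unfold qC
  rw [PySem.Int.floordiv_eq_iff_of_pos hk]
  constructor <;> nlinarith

theorem qC_top (n k : Int) (hk : 0 < k) : qC n k k = n := by
  unfold qC
  rw [PySem.Int.floordiv_eq_iff_of_pos hk]
  constructor <;> nlinarith

theorem qB_spec (n k j : Int) (hk : 1 ≤ k) (hkn : k ≤ n) (hj0 : 0 ≤ j) (hjn : j < n) :
    0 ≤ qB n k j ∧ qB n k j < k ∧ qC n k (qB n k j) ≤ j ∧ j < qC n k (qB n k j + 1) := by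
  have hn : (0 : Int) < n := by omega
  have hdef := (PySem.Int.floordiv_eq_iff_of_pos (a := (j + 1) * k - 1) (q := qB n k j) hn).mp rfl
  refine ⟨?_, ?_, ?_, ?_⟩
  · unfold qB
    rw [PySem.Int.le_floordiv_iff_mul_le hn]
    nlinarith
  · unfold qB
    rw [PySem.Int.floordiv_lt_iff_lt_mul hn]
    nlinarith
  · have : qC n k (qB n k j) < j + 1 := by
      unfold qC
      rw [PySem.Int.floordiv_lt_iff_lt_mul hk]
      nlinarith [hdef.1]
    omega
  · have : j + 1 ≤ qC n k (qB n k j + 1) := by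
      unfold qC
      rw [PySem.Int.le_floordiv_iff_mul_le hk]
      nlinarith [hdef.2]
    omega

theorem qB_unique (n k j b : Int) (hk : 1 ≤ k) (hkn : k ≤ n) (hj0 : 0 ≤ j) (hjn : j < n)
    (_hb0 : 0 ≤ b) (_hbk : b < k) (h1 : qC n k b ≤ j) (h2 : j < qC n k (b + 1)) :
    qB n k j = b := by
  obtain ⟨hB0, hBk, hB1, hB2⟩ := qB_spec n k j hk hkn hj0 hjn
  by_contra hne
  rcases lt_or_gt_of_ne hne with h | h
  · have : qC n k (qB n k j + 1) ≤ qC n k b :=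
      qC_mono n k _ _ (by omega) (by omega) (by omega)
    omega
  · have : qC n k (b + 1) ≤ qC n k (qB n k j) :=
      qC_mono n k _ _ (by omega) (by omega) (by omega)
    omega

theorem qB_zero (n k : Int) (hk : 1 ≤ k) (hkn : k ≤ n) : qB n k 0 = 0 := by
  have h1 := qC_succ n k 0 (by omega) hkn
  have h0 := qC_zero n k (by omega)
  exact qB_unique n k 0 0 hk hkn le_rfl (by omega) le_rfl (by omega) (by omega) (by omega)

theorem qB_last (n k : Int) (hk : 1 ≤ k) (hkn : k ≤ n) : qB n k (n - 1) = k - 1 := by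
  have h1 := qC_succ n k (k - 1) (by omega) hkn
  have h2 : qC n k (k - 1 + 1) = n := by
    have : k - 1 + 1 = k := by omega
    rw [this, qC_top n k (by omega)]
  exact qB_unique n k (n - 1) (k - 1) hk hkn (by omega) (by omega) (by omega) (by omega)
    (by omega) (by omega)

theorem qB_mono (n k j j' : Int) (hk : 1 ≤ k) (hn : 0 < n) (h : j ≤ j') :
    qB n k j ≤ qB n k j' := by
  unfold qB
  rw [PySem.Int.le_floordiv_iff_mul_le hn]
  have h1 := (PySem.Int.floordiv_eq_iff_of_pos (a := (j + 1) * k - 1) (q := PySem.Int.floordiv ((j + 1) * k - 1) n) hn).mp rfl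
  nlinarith [h1.1]

-- at a bin change the new bin is the successor and the change happens exactly at its cut
theorem qB_step (n k m : Int) (hk : 1 ≤ k) (hkn : k ≤ n) (hm : 1 ≤ m) (hmn : m < n)
    (hne : qB n k m ≠ qB n k (m - 1)) :
    qB n k m = qB n k (m - 1) + 1 ∧ qC n k (qB n k m) = m := by
  obtain ⟨hA0, hAk, hA1, hA2⟩ := qB_spec n k (m - 1) hk hkn (by omega) (by omega)
  obtain ⟨hB0, hBk, hB1, hB2⟩ := qB_spec n k m hk hkn (by omega) hmn
  have hmono := qB_mono n k (m - 1) m hk (by omega) (by omega)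
  have hge : qB n k (m - 1) + 1 ≤ qB n k m := by omega
  have hle : qC n k (qB n k (m - 1) + 1) ≤ qC n k (qB n k m) :=
    qC_mono n k _ _ (by omega) (by omega) hge
  -- qC (A+1) ≤ qC B ≤ m and m - 1 < qC (A+1) force qC B = qC (A+1) = m
  have hcb : qC n k (qB n k m) = m := by omega
  refine ⟨?_, hcb⟩
  by_contra hne2
  have hge2 : qB n k (m - 1) + 2 ≤ qB n k m := by omega
  have h3 : qC n k (qB n k (m - 1) + 1) < qC n k (qB n k (m - 1) + 1 + 1) :=
    qC_succ n k (qB n k (m - 1) + 1) (by omega) hkn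
  have h3' : qB n k (m - 1) + 1 + 1 = qB n k (m - 1) + 2 := by omega
  rw [h3'] at h3
  have h4 : qC n k (qB n k (m - 1) + 2) ≤ qC n k (qB n k m) :=
    qC_mono n k _ _ (by omega) (by omega) hge2
  omega

-- the invariant of B's scan: arriving at index m, the accumulated state is
-- (cut of current bin, current bin id, ranges of all finished bins)
theorem qloop (n k : Int) (hk : 1 ≤ k) (hkn : k ≤ n) :
    ∀ (d : Nat) (m : Int), 1 ≤ m → m + d = n →
    ((PySem.List.pyRange m n 1).foldl
      (fun (st : Int × Int × List (Int × Int)) j =>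
        let b := PySem.Int.floordiv ((j + 1) * k - 1) n
        if b ≠ st.2.1 then (j, b, st.2.2 ++ [(st.1, j)]) else st)
      (qC n k (qB n k (m - 1)), qB n k (m - 1),
        (PySem.List.pyRange 0 (qB n k (m - 1)) 1).map (fun b => (qC n k b, qC n k (b + 1)))))
    = (qC n k (k - 1), k - 1,
        (PySem.List.pyRange 0 (k - 1) 1).map (fun b => (qC n k b, qC n k (b + 1)))) := by
  intro d
  induction d with
  | zero =>
    intro m hm hmn
    have hmn' : m = n := by omega
    subst hmn'
    rw [PySem.List.pyRange_one_eq_nil le_rfl, List.foldl_nil, qB_last m k hk hkn]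
  | succ e ih =>
    intro m hm hmn
    have hmlt : m < n := by omega
    rw [PySem.List.pyRange_one_cons hmlt, List.foldl_cons]
    show List.foldl
      (fun (st : Int × Int × List (Int × Int)) j =>
        let b := PySem.Int.floordiv ((j + 1) * k - 1) n
        if b ≠ st.2.1 then (j, b, st.2.2 ++ [(st.1, j)]) else st)
      (if qB n k m ≠ qB n k (m - 1) then
          ((m : Int), qB n k m,
            (PySem.List.pyRange 0 (qB n k (m - 1)) 1).map (fun b => (qC n k b, qC n k (b + 1)))
              ++ [(qC n k (qB n k (m - 1)), m)])
        else (qC n k (qB n k (m - 1)), qB n k (m - 1),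
            (PySem.List.pyRange 0 (qB n k (m - 1)) 1).map (fun b => (qC n k b, qC n k (b + 1)))))
      (PySem.List.pyRange (m + 1) n 1)
      = (qC n k (k - 1), k - 1,
          (PySem.List.pyRange 0 (k - 1) 1).map (fun b => (qC n k b, qC n k (b + 1))))
    have hihm := ih (m + 1) (by omega) (by omega)
    rw [show m + 1 - 1 = m from by omega] at hihm
    by_cases hc : qB n k m = qB n k (m - 1)
    · rw [if_neg (by simpa using hc)]
      rw [hc] at hihm
      exact hihm
    · obtain ⟨hsucc, hcut⟩ := qB_step n k m hk hkn hm hmlt hc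
      rw [if_pos hc]
      have hst : ((m : Int), qB n k m,
          ((PySem.List.pyRange 0 (qB n k (m - 1)) 1).map (fun b => (qC n k b, qC n k (b + 1))))
            ++ [(qC n k (qB n k (m - 1)), m)])
          = (qC n k (qB n k m), qB n k m,
          (PySem.List.pyRange 0 (qB n k m) 1).map (fun b => (qC n k b, qC n k (b + 1)))) := by
        have hA0 := (qB_spec n k (m - 1) hk hkn (by omega) (by omega)).1
        have hr : PySem.List.pyRange 0 (qB n k m) 1
            = PySem.List.pyRange 0 (qB n k (m - 1)) 1 ++ [qB n k (m - 1)] := by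
          rw [hsucc]
          exact PySem.List.pyRange_one_succ_right hA0
        rw [hcut, hr, List.map_append, List.map_singleton]
        have hclast : qC n k (qB n k (m - 1) + 1) = m := by rw [← hsucc, hcut]
        rw [hclast]
      rw [hst]
      exact hihm

theorem quantile_bins_py_spec : Claim_equal_quantile_bins_py := by
  unfold Claim_equal_quantile_bins_py Spec_quantile_bins_py
  intro values n_bins _
  unfold quantile_bins_py quantile_bins_py_alt
  set n : Int := (values.length : Int) with hn
  by_cases h0 : n = 0
  · simp [h0]
  · simp only [h0, if_false]
    have hn1 : 1 ≤ n := by omega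
    set k := max 1 (min n_bins n) with hkdef
    have hk : 1 ≤ k := le_max_left _ _
    have hkn : k ≤ n := by
      rw [hkdef]
      exact max_le hn1 (min_le_right _ _)
    -- A's fold is append-if, hence a map over a filter; the filter keeps everything
    have hA : (PySem.List.pyRange 0 k 1).foldl
        (fun bins b =>
          let start := PySem.Int.floordiv (b * n) k
          let e := PySem.Int.floordiv ((b + 1) * n) k
          if e ≤ start then bins else bins ++ [(start, e)]) []
        = (PySem.List.pyRange 0 k 1).map (fun b => (qC n k b, qC n k (b + 1))) := by
      have hfun : (fun (bins : List (Int × Int)) (b : Int) =>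
          let start := PySem.Int.floordiv (b * n) k
          let e := PySem.Int.floordiv ((b + 1) * n) k
          if e ≤ start then bins else bins ++ [(start, e)])
          = (fun bins b => if (fun b => decide (qC n k b < qC n k (b + 1))) b
              then bins ++ [(fun b => (qC n k b, qC n k (b + 1))) b] else bins) := by
        funext bins b
        simp only [qC, decide_eq_true_eq]
        split_ifs with h1 h2 h2 <;> first | rfl | omega
      rw [hfun, PySem.List.foldl_append_if]
      rw [List.filter_eq_self.mpr]
      · simp
      · intro b _
        simpa using qC_succ n k b (by omega) hkn
    rw [hA]
    -- B's fold by the invariant, starting at index 1 with bin 0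
    have hinit : ((0 : Int), (0 : Int), ([] : List (Int × Int)))
        = (qC n k (qB n k (1 - 1)), qB n k (1 - 1),
          (PySem.List.pyRange 0 (qB n k (1 - 1)) 1).map (fun b => (qC n k b, qC n k (b + 1)))) := by
      have h1 : qB n k (1 - 1) = 0 := by
        rw [show (1 : Int) - 1 = 0 by omega]; exact qB_zero n k hk hkn
      rw [h1, qC_zero n k (by omega), PySem.List.pyRange_one_eq_nil le_rfl]
      simp
    rw [hinit, qloop n k hk hkn (n - 1).toNat 1 le_rfl (by omega)]
    have hr : PySem.List.pyRange 0 k 1 = PySem.List.pyRange 0 (k - 1) 1 ++ [k - 1] := by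
      have := PySem.List.pyRange_one_succ_right (a := 0) (b := k - 1) (by omega)
      rw [show k - 1 + 1 = k by omega] at this
      exact this
    rw [hr, List.map_append, List.map_singleton]
    have : qC n k (k - 1 + 1) = n := by
      rw [show k - 1 + 1 = k by omega]; exact qC_top n k (by omega)
    rw [this]
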